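-- pv_equiv track=rewrite | github.com/Ajay-Ram-Rana/DSA | Module-4/Q27.py | no_subarray_with_OR_1
-- ===== SOURCE A (Python) =====
-- def no_subarray_with_OR_1(A):
--   n  = len(A)
--   total_subarray = n*(n+1)//2
--   zeros_subarray = 0
--   count = 0
--   for num in A:
--     if num ==0:
--       count = count+1
--     else:
--       zeros_subarray = zeros_subarray + count*(count+1)//2
--       count = 0
--   zeros_subarray = zeros_subarray + count*(count+1)//2
--
--   return total_subarray-zeros_subarray
-- ===== SOURCE B (Python) =====
-- def no_subarray_with_OR_1(A):
--   last_nonzero = -1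
--   count = 0
--   for i, num in enumerate(A):
--     if num != 0:
--       last_nonzero = i
--     if last_nonzero >= 0:
--       count = count + last_nonzero + 1
--   return count
-- ===== Notes on version B (the rewrite author's own statement) =====
-- stated objective: alternative
-- what changed: Instead of computing total subarrays minus all-zero subarrays via zero-run lengths, B counts directly in one pass: it tracks the last nonzero index and adds last_nonzero+1 subarrays ending at each index.
import Mathlib
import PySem

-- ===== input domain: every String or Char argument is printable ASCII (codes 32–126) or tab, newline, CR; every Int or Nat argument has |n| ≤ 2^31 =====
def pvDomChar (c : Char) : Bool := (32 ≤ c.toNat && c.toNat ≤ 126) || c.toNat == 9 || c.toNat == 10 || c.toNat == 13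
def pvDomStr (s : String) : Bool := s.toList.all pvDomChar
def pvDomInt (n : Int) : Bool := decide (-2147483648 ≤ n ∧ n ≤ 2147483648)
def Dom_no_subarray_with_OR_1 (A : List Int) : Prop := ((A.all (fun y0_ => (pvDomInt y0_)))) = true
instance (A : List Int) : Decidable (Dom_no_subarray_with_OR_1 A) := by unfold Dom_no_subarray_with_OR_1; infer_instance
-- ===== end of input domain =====

-- B replaces A's "total minus all-zero subarrays" computation by a direct single-pass count
-- that adds, for each index, the number of subarrays ending there that contain a nonzero
-- (objective: alternative decomposition, same O(n) cost).

-- ===== PORT A =====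
-- loop body of A: state (zeros_subarray, count)
def pvStepA (st : Int × Int) (num : Int) : Int × Int :=
  if num = 0 then (st.1, st.2 + 1)
  else (st.1 + PySem.Int.floordiv (st.2 * (st.2 + 1)) 2, 0)

def no_subarray_with_OR_1 (A : List Int) : Int :=
  let n : Int := A.length
  let total_subarray := PySem.Int.floordiv (n * (n + 1)) 2
  let s := A.foldl pvStepA (0, 0)
  let zeros_subarray := s.1 + PySem.Int.floordiv (s.2 * (s.2 + 1)) 2
  total_subarray - zeros_subarray

-- ===== PORT B =====
-- loop body of B: state (last_nonzero, count); p = (i, num) from enumerate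
def pvStepB (st : Int × Int) (p : Int × Int) : Int × Int :=
  let last := if p.2 ≠ 0 then p.1 else st.1
  (last, if 0 ≤ last then st.2 + last + 1 else st.2)

def no_subarray_with_OR_1_alt (A : List Int) : Int :=
  ((PySem.List.enumerate A).foldl pvStepB (-1, 0)).2

-- ===== PRECONDITION & SPEC =====
def Spec_no_subarray_with_OR_1 (A : List Int) (out : Int) : Prop := out = no_subarray_with_OR_1_alt A
instance (A : List Int) (out : Int) : Decidable (Spec_no_subarray_with_OR_1 A out) := by unfold Spec_no_subarray_with_OR_1; infer_instance

-- ===== CLAIM (what is proved, stated in full; the proofs are below) =====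
def Claim_equal_no_subarray_with_OR_1 : Prop := ∀ (A : List Int), Dom_no_subarray_with_OR_1 A → Spec_no_subarray_with_OR_1 A (no_subarray_with_OR_1 A)

-- ===== LEMMAS AND PROOFS =====

-- c*(c+1) is even, so Python's // 2 of it is exact
lemma pv_fdiv_even (c : Int) : 2 * PySem.Int.floordiv (c * (c + 1)) 2 = c * (c + 1) := by
  obtain ⟨k, hk⟩ := Int.even_mul_succ_self c
  have h2 : c * (c + 1) = 2 * k := by omega
  rw [h2, PySem.Int.floordiv, Int.mul_fdiv_cancel_left _ (by norm_num)]

-- Invariant linking the two loops: after a processed prefix of length i, A's state is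
-- (Z, c) (completed-zero-run total, trailing zero-run length), B's state is
-- (i - 1 - c, cnt) with 2*cnt = i*(i+1) - 2*Z - c*(c+1); this is preserved over any suffix l.
lemma pv_key (l : List Int) : ∀ (i Z c cnt : Int), 0 ≤ c → c ≤ i →
    2 * cnt = i * (i + 1) - 2 * Z - c * (c + 1) →
    2 * ((PySem.List.enumerate l i).foldl pvStepB (i - 1 - c, cnt)).2
      = (i + l.length) * (i + l.length + 1)
        - 2 * (l.foldl pvStepA (Z, c)).1
        - (l.foldl pvStepA (Z, c)).2 * ((l.foldl pvStepA (Z, c)).2 + 1) := by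
  induction l with
  | nil =>
    intro i Z c cnt hc hci h
    simpa [PySem.List.enumerate_nil] using h
  | cons x xs ih =>
    intro i Z c cnt hc hci h
    rw [PySem.List.enumerate_cons]
    simp only [List.foldl_cons, List.length_cons]
    by_cases hx : x = 0
    · have hst : pvStepB (i - 1 - c, cnt) (i, x) = ((i + 1) - 1 - (c + 1), cnt + (i - c)) := by
        simp only [pvStepB, hx, ne_eq, not_true_eq_false, if_false]
        split_ifs with h0 <;> simp <;> omega
      have hsa : pvStepA (Z, c) x = (Z, c + 1) := by simp [pvStepA, hx]
      rw [hst, hsa]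
      have h2 := ih (i + 1) Z (c + 1) (cnt + (i - c)) (by omega) (by omega)
        (by linear_combination h)
      push_cast
      push_cast at h2
      linear_combination h2
    · have hi : 0 ≤ i := le_trans hc hci
      have hst : pvStepB (i - 1 - c, cnt) (i, x) = ((i + 1) - 1 - 0, cnt + i + 1) := by
        simp only [pvStepB, Prod.mk.injEq]
        split_ifs <;> omega
      have hsa : pvStepA (Z, c) x = (Z + PySem.Int.floordiv (c * (c + 1)) 2, 0) := by
        simp [pvStepA, hx]
      rw [hst, hsa]
      have e := pv_fdiv_even c
      have h2 := ih (i + 1) (Z + PySem.Int.floordiv (c * (c + 1)) 2) 0 (cnt + i + 1)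
        (by omega) (by omega) (by linear_combination h + e)
      push_cast
      push_cast at h2
      linear_combination h2

-- ===== VERDICT (by name: the statement is the Claim_ definition above) =====
theorem no_subarray_with_OR_1_spec : Claim_equal_no_subarray_with_OR_1 := by
  intro A _
  unfold Spec_no_subarray_with_OR_1
  simp only [no_subarray_with_OR_1, no_subarray_with_OR_1_alt]
  have hk := pv_key A 0 0 0 0 (by norm_num) (by norm_num) (by ring)
  have hz : (0 : Int) - 1 - 0 = -1 := by norm_num
  rw [hz] at hk
  simp only [zero_add] at hk
  have e1 := pv_fdiv_even ((A.length : Int))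
  have e2 := pv_fdiv_even ((A.foldl pvStepA (0, 0)).2)
  linarith [hk, e1, e2]
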